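-- pv_equiv track=rewrite | github.com/Instinct323/pymod | zjdl/utils/ckpt_tool.py | group_idx
-- ===== SOURCE A (Python) =====
-- def group_idx(state_dict: dict,
--               depth: int) -> dict:
--     """
--     :param state_dict: model state dict
--     :param depth: group depth
--     :return: group index
--     """
--     ret, sep = {}, "."
--     for k in state_dict:
--         idx = k.split(sep)[:depth]
--         idx = tuple((int(i) if i.isdigit() else i) for i in idx)
--         ret[k] = idx
--
--     idx_unique = sorted(set(ret.values()))
--     for k in ret:
--         ret[k] = idx_unique.index(ret[k])
--     return ret
-- ===== SOURCE B (Python) =====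
-- def group_idx(state_dict: dict, depth: int) -> dict:
--     def conv(k):
--         return tuple(int(p) if p.isdigit() else p for p in k.split(".")[:depth])
--     tups = {k: conv(k) for k in state_dict}
--     uniq = set(tups.values())
--     return {k: sum(u < t for u in uniq) for k, t in tups.items()}
-- ===== Notes on version B (the rewrite author's own statement) =====
-- stated objective: simpler
-- what changed: A materialises a sorted list of the unique depth-prefix tuples and runs list.index over it for every key; B never sorts: it uses the order-theoretic characterisation that the rank of a tuple in the sorted unique list equals the number of distinct tuples strictly below it, and counts those directly per key.
import Mathlib
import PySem

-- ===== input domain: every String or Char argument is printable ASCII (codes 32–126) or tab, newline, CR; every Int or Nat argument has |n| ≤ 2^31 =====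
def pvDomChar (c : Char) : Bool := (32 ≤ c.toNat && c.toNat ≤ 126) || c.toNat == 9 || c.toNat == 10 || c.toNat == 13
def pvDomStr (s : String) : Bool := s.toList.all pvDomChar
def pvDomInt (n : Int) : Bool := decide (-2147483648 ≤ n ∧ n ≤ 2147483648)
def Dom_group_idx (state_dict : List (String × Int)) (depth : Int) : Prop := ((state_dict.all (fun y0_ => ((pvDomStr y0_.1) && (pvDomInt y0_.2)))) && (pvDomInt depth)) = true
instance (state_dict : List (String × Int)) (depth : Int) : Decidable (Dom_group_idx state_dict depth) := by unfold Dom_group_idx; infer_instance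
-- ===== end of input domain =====

-- B never sorts: it replaces A's sorted-unique table plus a per-key list .index scan by the
-- order-theoretic rank (number of distinct tuples strictly below a key's tuple), counted directly.

-- ===== PORT A =====
-- a tuple component: int(i) if i.isdigit() else i
inductive TupElem where | int : Int → TupElem | str : List Char → TupElem
deriving DecidableEq, Repr

-- Python's '<' on components; the int-vs-str case is a tie-break Python never evaluates
-- on inputs admitted by Pre_ (there Python would raise TypeError instead)
def ltC : TupElem → TupElem → Bool
  | .int m, .int n => decide (m < n)
  | .int _, .str _ => true
  | .str _, .int _ => false
  | .str s, .str t => decide (s < t)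

-- Python's '<' on tuples: decided by the first non-equal component, shorter prefix first
def ltT : List TupElem → List TupElem → Bool
  | _, [] => false
  | [], _ :: _ => true
  | a :: as, b :: bs => if a = b then ltT as bs else ltC a b

-- tuple((int(i) if i.isdigit() else i) for i in k.split(".")[:depth])
def convComp (cs : List Char) : TupElem :=
  if PySem.Chars.strIsdigit cs then TupElem.int ((PySem.Int.ofChars? cs).getD 0) else TupElem.str cs

def tupOf (k : String) (depth : Int) : List TupElem :=
  (PySem.List.slice (PySem.Chars.splitOn k.toList ['.']) none (some depth)).map convComp

-- hand port of Python's stable sorted(...) with strict-less test lt (insert after equal keys)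
def insB {α : Type} (lt : α → α → Bool) (x : α) : List α → List α
  | [] => [x]
  | y :: ys => if lt x y then x :: y :: ys else y :: insB lt x ys

def sortL {α : Type} (lt : α → α → Bool) (xs : List α) : List α :=
  xs.foldl (fun acc x => insB lt x acc) []

def group_idx (state_dict : List (String × Int)) (depth : Int) : List (String × Int) :=
  let ks := PySem.List.dedup (state_dict.map Prod.fst)     -- dict keys, first occurrence
  let ret := ks.map (fun k => (k, tupOf k depth))          -- ret[k] = idx
  let uniq := PySem.Set.ofList (ret.map Prod.snd)          -- set(ret.values())
  let S := sortL ltT uniq                                  -- idx_unique = sorted(...)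
  ret.map (fun p => (p.1, (((PySem.List.index? S p.2).getD 0 : Nat) : Int)))

-- ===== PORT B =====
-- B's own port of Python's component '<' (the int-vs-str tie-break mirrors ltC: Python
-- would raise TypeError there, which Pre_ excludes)
def eLt : TupElem → TupElem → Bool
  | .int m, .int n => decide (m < n)
  | .int _, .str _ => true
  | .str _, .int _ => false
  | .str s, .str t => decide (s < t)

-- B's port of Python's tuple '<': first differing position decides, else the shorter is smaller
def tLt (a b : List TupElem) : Bool :=
  match (a.zip b).find? (fun p => p.1 ≠ p.2) with
  | some p => eLt p.1 p.2
  | none => decide (a.length < b.length)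

-- conv(k) from Source B
def convB (k : String) (depth : Int) : List TupElem :=
  (PySem.List.slice (PySem.Chars.splitOn k.toList ['.']) none (some depth)).map convComp

def group_idx_alt (state_dict : List (String × Int)) (depth : Int) : List (String × Int) :=
  let tups := (PySem.List.dedup (state_dict.map Prod.fst)).map (fun k => (k, convB k depth))
  let uniq := PySem.Set.ofList (tups.map Prod.snd)
  -- {k: sum(u < t for u in uniq) for k, t in tups.items()}
  tups.map (fun p => (p.1, uniq.foldl (fun acc u => acc + (if tLt u p.2 then 1 else 0)) 0))

-- ===== PRECONDITION & SPEC =====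
-- compOK/lexOK: Python can compare the two tuples without a TypeError iff at their first
-- non-equal component both sides are ints or both are strings
def compOK : TupElem → TupElem → Bool
  | .int _, .str _ => false
  | .str _, .int _ => false
  | _, _ => true

def lexOK (xs ys : List TupElem) : Bool :=
  match (xs.zip ys).find? (fun p => p.1 ≠ p.2) with
  | some p => compOK p.1 p.2
  | none => true

-- Pre_ excludes exactly the inputs on which two depth-prefix tuples are incomparable (int vs
-- str at their first differing component): there Python raises TypeError (A in sorted, B in '<').
def Pre_group_idx (state_dict : List (String × Int)) (depth : Int) : Prop :=
  ∀ k1 ∈ state_dict.map Prod.fst, ∀ k2 ∈ state_dict.map Prod.fst,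
    lexOK (tupOf k1 depth) (tupOf k2 depth) = true
instance (state_dict : List (String × Int)) (depth : Int) : Decidable (Pre_group_idx state_dict depth) := by
  unfold Pre_group_idx; infer_instance

def pvWitness_group_idx : (List (String × Int)) × Int :=
  ([("layers.0.weight", 1), ("layers.1.weight", 2), ("bias", 3)], 2)

def Spec_group_idx (state_dict : List (String × Int)) (depth : Int) (out : List (String × Int)) : Prop := out = group_idx_alt state_dict depth
instance (state_dict : List (String × Int)) (depth : Int) (out : List (String × Int)) : Decidable (Spec_group_idx state_dict depth out) := by unfold Spec_group_idx; infer_instance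

-- ===== CLAIM (what is proved, stated in full; the proofs are below) =====
def Claim_equal_group_idx : Prop := ∀ (state_dict : List (String × Int)) (depth : Int), Dom_group_idx state_dict depth → Pre_group_idx state_dict depth → Spec_group_idx state_dict depth (group_idx state_dict depth)

-- ===== LEMMAS AND PROOFS =====

theorem ltC_total {a b : TupElem} (h : a ≠ b) : ltC a b = true ∨ ltC b a = true := by
  cases a with
  | int m => cases b with
    | int n =>
      have hmn : m ≠ n := fun he => h (by rw [he])
      simp [ltC]; omega
    | str t => left; rfl
  | str s => cases b with
    | int n => right; rfl
    | str t =>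
      have hst : s ≠ t := by intro he; exact h (by rw [he])
      rcases lt_trichotomy s t with h' | h' | h' <;> simp_all [ltC]
theorem ltC_irrefl (a : TupElem) : ltC a a = false := by
  cases a <;> simp [ltC]
theorem ltC_trans {a b c : TupElem} (h1 : ltC a b = true) (h2 : ltC b c = true) : ltC a c = true := by
  cases a <;> cases b <;> cases c <;> simp_all [ltC]
  · omega
  · exact lt_trans ‹_ < _› ‹_ < _›
theorem ltT_trans {a b c : List TupElem} (h1 : ltT a b = true) (h2 : ltT b c = true) : ltT a c = true := by
  induction a generalizing b c with
  | nil =>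
    cases b with
    | nil => cases c <;> simp_all [ltT]
    | cons y ys => cases c with
      | nil => simp [ltT] at h2
      | cons z zs => simp [ltT]
  | cons x xs ih =>
    cases b with
    | nil => simp [ltT] at h1
    | cons y ys => cases c with
      | nil => simp [ltT] at h2
      | cons z zs =>
        simp only [ltT] at h1 h2 ⊢
        by_cases hxy : x = y <;> by_cases hyz : y = z
        · subst hxy; subst hyz
          simp_all
          exact ih h1 h2
        · subst hxy
          simp_all
        · subst hyz
          simp_all
        · simp only [if_neg hxy] at h1
          simp only [if_neg hyz] at h2
          have hxz : ltC x z = true := ltC_trans h1 h2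
          have hne : x ≠ z := by
            intro he; subst he
            have hxx := ltC_trans h1 h2
            simp [ltC_irrefl] at hxx
          simp [if_neg hne, hxz]
theorem ltT_total {a b : List TupElem} (h : a ≠ b) : ltT a b = true ∨ ltT b a = true := by
  induction a generalizing b with
  | nil => cases b with
    | nil => exact absurd rfl h
    | cons y ys => left; rfl
  | cons x xs ih =>
    cases b with
    | nil => right; rfl
    | cons y ys =>
      by_cases hxy : x = y
      · subst hxy
        have : xs ≠ ys := by intro he; exact h (by rw [he])
        rcases ih this with h' | h' <;> simp [ltT, h']
      · rcases ltC_total hxy with h' | h' <;> simp [ltT, hxy, Ne.symm hxy, h']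
theorem ltT_irrefl (a : List TupElem) : ltT a a = false := by
  induction a with
  | nil => rfl
  | cons x xs ih => simp [ltT, ih]
theorem ltT_asymm {a b : List TupElem} (h : ltT a b = true) : ltT b a = false := by
  by_contra hc
  have := ltT_trans h (by simpa using hc)
  simp [ltT_irrefl] at this
theorem mem_insB {α : Type} (lt : α → α → Bool) (x y : α) (l : List α) :
    y ∈ insB lt x l ↔ y = x ∨ y ∈ l := by
  induction l with
  | nil => simp [insB]
  | cons z zs ih =>
    simp only [insB]
    split
    · constructor
      · intro h; rcases List.mem_cons.mp h with h | h
        · exact Or.inl h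
        · exact Or.inr h
      · intro h; rcases h with h | h
        · exact List.mem_cons.mpr (Or.inl h)
        · exact List.mem_cons.mpr (Or.inr h)
    · simp [ih]; tauto
theorem perm_insB {α : Type} (lt : α → α → Bool) (x : α) (l : List α) :
    (insB lt x l).Perm (x :: l) := by
  induction l with
  | nil => simp [insB]
  | cons z zs ih =>
    simp only [insB]
    split
    · exact List.Perm.refl _
    · exact ((ih.cons z).trans (List.Perm.swap x z zs)).symm.symm
theorem pairwise_insB {α : Type} (lt : α → α → Bool)
    (hasym : ∀ a b, lt a b = true → lt b a = false)
    (htrans : ∀ a b c, lt a b = true → lt b c = true → lt a c = true)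
    (x : α) (l : List α) (h : l.Pairwise (fun a b => lt b a = false)) :
    (insB lt x l).Pairwise (fun a b => lt b a = false) := by
  induction l with
  | nil => simp [insB]
  | cons y ys ih =>
    rcases List.pairwise_cons.mp h with ⟨hy, hys⟩
    simp only [insB]
    split
    · rename_i hxy
      refine List.pairwise_cons.mpr ⟨?_, h⟩
      intro z hz
      rcases List.mem_cons.mp hz with rfl | hz
      · exact hasym _ _ hxy
      · rcases Bool.eq_false_or_eq_true (lt z x) with ht | hf
        · exact absurd (htrans _ _ _ ht hxy) (by simp [hy z hz])
        · exact hf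
    · rename_i hxy
      refine List.pairwise_cons.mpr ⟨?_, ih hys⟩
      intro z hz
      rcases (mem_insB lt x z ys).mp hz with rfl | hz
      · exact Bool.not_eq_true _ ▸ (by simpa using hxy)
      · exact hy z hz
theorem perm_sortL_aux {α : Type} (lt : α → α → Bool) (xs acc : List α) :
    (xs.foldl (fun acc x => insB lt x acc) acc).Perm (acc ++ xs) := by
  induction xs generalizing acc with
  | nil => simp
  | cons x xs ih =>
    simp only [List.foldl_cons]
    refine (ih (insB lt x acc)).trans ?_
    have h1 : (insB lt x acc ++ xs).Perm ((x :: acc) ++ xs) :=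
      (perm_insB lt x acc).append_right xs
    refine h1.trans ?_
    simpa using List.perm_middle.symm
theorem perm_sortL {α : Type} (lt : α → α → Bool) (xs : List α) :
    (sortL lt xs).Perm xs := by
  simpa using perm_sortL_aux lt xs []
theorem pairwise_sortL {α : Type} (lt : α → α → Bool)
    (hasym : ∀ a b, lt a b = true → lt b a = false)
    (htrans : ∀ a b c, lt a b = true → lt b c = true → lt a c = true)
    (xs : List α) :
    (sortL lt xs).Pairwise (fun a b => lt b a = false) := by
  have aux : ∀ (xs acc : List α), acc.Pairwise (fun a b => lt b a = false) →
      (xs.foldl (fun acc x => insB lt x acc) acc).Pairwise (fun a b => lt b a = false) := by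
    intro xs
    induction xs with
    | nil => intro acc h; simpa using h
    | cons x xs ih =>
      intro acc h
      exact ih _ (pairwise_insB lt hasym htrans x acc h)
  exact aux xs [] (by simp)
theorem idx_eq_countP (S : List (List TupElem)) (t : List TupElem)
    (hs : S.Pairwise (fun a b => ltT a b = true)) (ht : t ∈ S) :
    (PySem.List.index? S t).getD 0 = S.countP (fun v => ltT v t) := by
  induction S with
  | nil => simp at ht
  | cons s S' ih =>
    rcases List.pairwise_cons.mp hs with ⟨hhead, hS'⟩
    by_cases hst : s = t
    · subst hst
      rw [PySem.List.index?_cons_self]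
      have h0 : ∀ v ∈ s :: S', ¬ (ltT v s = true) := by
        intro v hv
        rcases List.mem_cons.mp hv with rfl | hv
        · simp [ltT_irrefl]
        · simp [ltT_asymm (hhead v hv)]
      simp [List.countP_eq_zero.mpr h0]
    · have ht' : t ∈ S' := by
        rcases List.mem_cons.mp ht with rfl | h
        · exact absurd rfl hst
        · exact h
      rw [PySem.List.index?_cons_of_ne S' hst]
      have hsome : (PySem.List.index? S' t).isSome := (PySem.List.index?_isSome_iff S' t).mpr ht'
      cases hidx : PySem.List.index? S' t with
      | none => rw [hidx] at hsome; simp at hsome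
      | some j =>
        have hIH := ih hS' ht'
        rw [hidx] at hIH
        simp only [Option.getD_some] at hIH
        simp only [Option.map_some, Option.getD_some]
        rw [List.countP_cons]
        simp [hhead t ht', hIH]

-- B's component/tuple comparisons agree with A's
theorem eLt_eq_ltC (a b : TupElem) : eLt a b = ltC a b := by
  cases a <;> cases b <;> rfl
theorem tLt_eq_ltT (a b : List TupElem) : tLt a b = ltT a b := by
  induction a generalizing b with
  | nil => cases b <;> simp [tLt, ltT]
  | cons x xs ih =>
    cases b with
    | nil => simp [tLt, ltT]
    | cons y ys =>
      by_cases hxy : x = y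
      · subst hxy
        simpa [tLt, ltT, List.find?] using ih ys
      · simp [tLt, ltT, hxy, eLt_eq_ltC]

-- sum(bool) as a fold equals countP
theorem foldl_count (f : List TupElem → Bool) (l : List (List TupElem)) (acc : Int) :
    l.foldl (fun acc u => acc + (if f u then 1 else 0)) acc = acc + (l.countP f : Int) := by
  induction l generalizing acc with
  | nil => simp
  | cons u l' ih =>
    simp only [List.foldl_cons, ih, List.countP_cons]
    by_cases hu : f u = true <;> simp [hu]; omega

theorem AB_eq (state_dict : List (String × Int)) (depth : Int) :
    group_idx state_dict depth = group_idx_alt state_dict depth := by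
  unfold group_idx group_idx_alt
  have hconv : ∀ k, convB k depth = tupOf k depth := fun _ => rfl
  simp only [hconv]
  set ks := PySem.List.dedup (state_dict.map Prod.fst) with hks
  set ret := ks.map (fun k => (k, tupOf k depth)) with hret
  set uniq := PySem.Set.ofList (ret.map Prod.snd) with huniq
  set S := sortL ltT uniq with hS
  have hnduniq : uniq.Nodup := PySem.Set.nodup_ofList _
  have hSperm : S.Perm uniq := perm_sortL _ _
  have hsortS : S.Pairwise (fun a b => ltT b a = false) :=
    pairwise_sortL ltT (fun a b h => ltT_asymm h) (fun a b c h1 h2 => ltT_trans h1 h2) uniq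
  have hndS : S.Nodup := hSperm.nodup_iff.mpr hnduniq
  have hstrict : S.Pairwise (fun a b => ltT a b = true) := by
    refine (hsortS.and hndS).imp ?_
    rintro a b ⟨h1, h2⟩
    rcases ltT_total h2 with h | h
    · exact h
    · exact absurd h (by simp [h1])
  apply List.map_congr_left
  rintro ⟨k, t⟩ hp
  have htv : t ∈ ret.map Prod.snd := List.mem_map.mpr ⟨(k, t), hp, rfl⟩
  have htu : t ∈ uniq := (PySem.Set.mem_ofList _ _).mpr htv
  have htS : t ∈ S := hSperm.mem_iff.mpr htu
  have hA : (PySem.List.index? S t).getD 0 = S.countP (fun v => ltT v t) :=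
    idx_eq_countP S t hstrict htS
  have hB : uniq.foldl (fun acc u => acc + (if tLt u t then 1 else 0)) 0
      = (uniq.countP (fun v => ltT v t) : Int) := by
    have h1 := foldl_count (fun u => tLt u t) uniq 0
    have h2 : uniq.countP (fun u => tLt u t) = uniq.countP (fun v => ltT v t) :=
      List.countP_congr (fun v _ => by rw [tLt_eq_ltT])
    rw [h1, h2]; ring
  simp only [hB, hA]
  rw [hSperm.countP_eq]

-- ===== VERDICT (by name: the statement is the Claim_ definition above) =====
theorem group_idx_spec : Claim_equal_group_idx := by
  intro state_dict depth _ _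
  unfold Spec_group_idx
  exact AB_eq state_dict depth
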